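-- pv_equiv track=rewrite | github.com/Verft4/Drone | genetico3.py | distancia_total
-- ===== SOURCE A (Python) =====
-- def distancia(p1, p2):
--     return abs(p1[0] - p2[0]) + abs(p1[1] - p2[1])
--
-- def distancia_total(rota, inicio, pontos):
--     pos_atual = inicio
--     dist = 0
--     for ponto in rota:
--         dist += distancia(pos_atual, pontos[ponto])
--         pos_atual = pontos[ponto]
--     dist += distancia(pos_atual, inicio)
--     return dist
-- ===== SOURCE B (Python) =====
-- def distancia(p1, p2):
--     return abs(p1[0] - p2[0]) + abs(p1[1] - p2[1])
--
-- def distancia_total(rota, inicio, pontos):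
--     # Manhattan distance separates per axis; the route is a closed cycle,
--     # so sum |v[i] - v[(i+1) % n]| cyclically on each coordinate projection.
--     xs = [inicio[0]] + [pontos[p][0] for p in rota]
--     ys = [inicio[1]] + [pontos[p][1] for p in rota]
--     def cyclic(v):
--         n = len(v)
--         return sum(abs(v[i] - v[(i + 1) % n]) for i in range(n))
--     return cyclic(xs) + cyclic(ys)
-- ===== Notes on version B (the rewrite author's own statement) =====
-- stated objective: alternative
-- what changed: B decomposes the Manhattan metric per coordinate axis: it builds the x- and y-projection sequences and sums absolute differences cyclically with modular indexing, instead of threading a current-position point accumulator and adding a separate closing leg.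
import Mathlib
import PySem

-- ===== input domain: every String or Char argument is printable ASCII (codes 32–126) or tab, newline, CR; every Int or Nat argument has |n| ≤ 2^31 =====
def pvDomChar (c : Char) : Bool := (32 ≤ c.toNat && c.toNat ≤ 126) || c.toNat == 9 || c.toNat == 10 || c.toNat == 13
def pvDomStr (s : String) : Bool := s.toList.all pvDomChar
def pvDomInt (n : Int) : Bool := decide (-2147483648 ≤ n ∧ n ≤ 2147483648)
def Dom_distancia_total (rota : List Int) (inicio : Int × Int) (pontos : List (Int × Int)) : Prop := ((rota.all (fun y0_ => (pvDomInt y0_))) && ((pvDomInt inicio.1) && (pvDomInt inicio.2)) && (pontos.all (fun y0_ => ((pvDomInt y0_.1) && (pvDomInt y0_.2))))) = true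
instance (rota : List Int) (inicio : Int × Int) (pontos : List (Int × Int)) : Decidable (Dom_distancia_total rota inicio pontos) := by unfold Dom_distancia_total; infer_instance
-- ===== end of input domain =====

-- B decomposes the Manhattan metric per axis and sums each coordinate projection cyclically
-- with modular indexing; same cost ('alternative'), no threaded position and no special closing leg.

-- ===== PORT A =====
def pvDist (p q : Int × Int) : Int := |p.1 - q.1| + |p.2 - q.2|

-- A: thread pos_atual/dist through the loop; pontos[ponto] is pyGet? (none = IndexError,
-- excluded by Pre_; totalized with (0,0) outside Pre_)
def distancia_total (rota : List Int) (inicio : Int × Int) (pontos : List (Int × Int)) : Int :=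
  let st := rota.foldl (fun (s : (Int × Int) × Int) ponto =>
    let pt := (PySem.List.pyGet? pontos ponto).getD (0, 0)
    (pt, s.2 + pvDist s.1 pt)) (inicio, 0)
  st.2 + pvDist st.1 inicio

-- ===== PORT B =====
-- cyclic(v) = sum(abs(v[i] - v[(i+1) % n]) for i in range(n)); indices are in-range Nats
def pvCyclic (v : List Int) : Int :=
  let n := v.length
  ((List.range n).map (fun i => |v.getD i 0 - v.getD ((i + 1) % n) 0|)).sum

def distancia_total_alt (rota : List Int) (inicio : Int × Int) (pontos : List (Int × Int)) : Int :=
  let xs := inicio.1 :: rota.map (fun p => ((PySem.List.pyGet? pontos p).getD (0, 0)).1)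
  let ys := inicio.2 :: rota.map (fun p => ((PySem.List.pyGet? pontos p).getD (0, 0)).2)
  pvCyclic xs + pvCyclic ys

-- ===== PRECONDITION & SPEC =====
-- Pre_: every index in rota is a valid Python index into pontos (otherwise A raises IndexError).
def Pre_distancia_total (rota : List Int) (inicio : Int × Int) (pontos : List (Int × Int)) : Prop :=
  ∀ p ∈ rota, PySem.Raise.InRange pontos.length p
instance (rota : List Int) (inicio : Int × Int) (pontos : List (Int × Int)) : Decidable (Pre_distancia_total rota inicio pontos) := by unfold Pre_distancia_total; infer_instance
def pvWitness_distancia_total : List Int × (Int × Int) × (List (Int × Int)) := ([0, 1, -1], (0, 0), [(1, 2), (3, 1)])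

def Spec_distancia_total (rota : List Int) (inicio : Int × Int) (pontos : List (Int × Int)) (out : Int) : Prop := out = distancia_total_alt rota inicio pontos
instance (rota : List Int) (inicio : Int × Int) (pontos : List (Int × Int)) (out : Int) : Decidable (Spec_distancia_total rota inicio pontos out) := by unfold Spec_distancia_total; infer_instance

-- ===== CLAIM (what is proved, stated in full; the proofs are below) =====
def Claim_equal_distancia_total : Prop := ∀ (rota : List Int) (inicio : Int × Int) (pontos : List (Int × Int)), Dom_distancia_total rota inicio pontos → Pre_distancia_total rota inicio pontos → Spec_distancia_total rota inicio pontos (distancia_total rota inicio pontos)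

-- ===== LEMMAS AND PROOFS =====

-- sum of |v[i]-v[i+1]| over adjacent positions, structurally
def pvAdj : List Int → Int
  | a :: b :: t => |a - b| + pvAdj (b :: t)
  | _ => 0

-- non-wrapping part of the cyclic sum equals the structural adjacent sum
theorem pv_adj_sum (t : List Int) : ∀ a : Int,
    ((List.range t.length).map
      (fun i => |(a :: t).getD i 0 - (a :: t).getD (i + 1) 0|)).sum = pvAdj (a :: t) := by
  induction t with
  | nil => intro a; simp [pvAdj]
  | cons b t ih =>
      intro a
      simp only [List.length_cons, List.range_succ_eq_map, List.map_cons, List.map_map,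
        List.sum_cons]
      have : ((List.range t.length).map
          (fun i => |(b :: t).getD i 0 - (b :: t).getD (i + 1) 0|)).sum = pvAdj (b :: t) := ih b
      simpa [pvAdj, Function.comp] using this

-- last element of a cons-list via getD at the last index
theorem pv_getD_last (t : List Int) : ∀ a : Int, (a :: t).getD t.length 0 = t.getLastD a := by
  induction t with
  | nil => intro a; simp
  | cons b t ih =>
      intro a
      simp only [List.length_cons, List.getD_cons_succ, List.getLastD_cons]
      exact ih b

-- cyclic sum = adjacent sum + wrap-around term
theorem pv_cyclic_eq (a : Int) (t : List Int) :
    pvCyclic (a :: t) = pvAdj (a :: t) + |t.getLastD a - a| := by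
  simp only [pvCyclic, List.length_cons, List.range_succ, List.map_append, List.sum_append,
    List.map_cons, List.map_nil, List.sum_cons, List.sum_nil]
  have h1 : ((List.range t.length).map
      (fun i => |(a :: t).getD i 0 - (a :: t).getD ((i + 1) % (t.length + 1)) 0|)).sum
      = pvAdj (a :: t) := by
    rw [← pv_adj_sum t a]
    apply congrArg
    apply List.map_congr_left
    intro i hi
    have : i < t.length := List.mem_range.mp hi
    have : (i + 1) % (t.length + 1) = i + 1 := Nat.mod_eq_of_lt (by omega)
    rw [this]
  rw [h1, Nat.mod_self]
  simp only [pv_getD_last t a, List.getD_cons_zero, add_zero]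

-- getLastD commutes with map
theorem pv_getLastD_map (f : (Int × Int) → Int) (m : List (Int × Int)) : ∀ a : Int × Int,
    (m.map f).getLastD (f a) = f (m.getLastD a) := by
  induction m with
  | nil => intro a; simp
  | cons b m ih =>
      intro a
      simp only [List.map_cons, List.getLastD_cons]
      exact ih b

-- A's threaded fold = (last visited point, acc + per-axis adjacent sums over the point sequence)
theorem pv_key (pontos : List (Int × Int)) (l : List Int) : ∀ (s : Int × Int) (d : Int),
    l.foldl (fun (st : (Int × Int) × Int) ponto =>
        ((PySem.List.pyGet? pontos ponto).getD (0, 0),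
          st.2 + pvDist st.1 ((PySem.List.pyGet? pontos ponto).getD (0, 0)))) (s, d)
      = (let m := l.map (fun p => (PySem.List.pyGet? pontos p).getD (0, 0))
         (m.getLastD s,
          d + pvAdj (s.1 :: m.map Prod.fst) + pvAdj (s.2 :: m.map Prod.snd))) := by
  induction l with
  | nil => intro s d; simp [pvAdj]
  | cons x l ih =>
      intro s d
      simp only [List.foldl_cons, ih, List.map_cons, List.getLastD_cons]
      refine Prod.ext rfl ?_
      simp only [pvAdj, pvDist]
      ring

-- ===== VERDICT (by name: the statement is the Claim_ definition above) =====
theorem distancia_total_spec : Claim_equal_distancia_total := by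
  intro rota inicio pontos _ _
  simp only [Spec_distancia_total, distancia_total, distancia_total_alt, pv_key]
  rw [pv_cyclic_eq, pv_cyclic_eq]
  have hx : rota.map (fun p => ((PySem.List.pyGet? pontos p).getD (0, 0)).1)
      = (rota.map (fun p => (PySem.List.pyGet? pontos p).getD (0, 0))).map Prod.fst := by
    rw [List.map_map]; rfl
  have hy : rota.map (fun p => ((PySem.List.pyGet? pontos p).getD (0, 0)).2)
      = (rota.map (fun p => (PySem.List.pyGet? pontos p).getD (0, 0))).map Prod.snd := by
    rw [List.map_map]; rfl
  rw [hx, hy, pv_getLastD_map Prod.fst _ inicio, pv_getLastD_map Prod.snd _ inicio]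
  simp only [pvDist]
  ring
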